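-- pv_equiv track=rewrite | github.com/akhandsingh17/assignments | leetcode/LeetCode1009.py | LeetCode1009
-- ===== SOURCE A (Python) =====
-- def GetBinary(num):
--
--     lst=[]
--     while num!=0:
--         rem=num%2
--         num=num//2
--         lst.append(str(rem))
--     lst.reverse()
--     return ''.join(lst)
--
-- def GetComplement(bin_num):
--
--     lst=[]
--     for i in range(0,len(bin_num)):
--         if bin_num[i]=='0':
--             lst.append(1)
--         else:
--             lst.append(0)
--     return lst
--
-- def LeetCode1009(num):
--
--     bin_num=GetBinary(num)
--     com_num=GetComplement(bin_num)
--
--     sum=0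
--     k=0
--     for i in range(len(com_num)-1,-1,-1):
--         sum=sum+(com_num[i]*(2**k))
--         k=k+1
--     return sum
-- ===== SOURCE B (Python) =====
-- def LeetCode1009(num):
--     return (1 << num.bit_length()) - 1 - num
-- ===== Notes on version B (the rewrite author's own statement) =====
-- stated objective: faster
-- what changed: Replaces A's three-pass pipeline (build a binary string digit by digit, flip each character into a list, re-weight the flipped digits with a power loop) by the single closed-form arithmetic expression (1 << num.bit_length()) - 1 - num.
-- outside the precondition, e.g. on LeetCode1009(-3): A does not finish within the time limit, B returns 6
import Mathlib
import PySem

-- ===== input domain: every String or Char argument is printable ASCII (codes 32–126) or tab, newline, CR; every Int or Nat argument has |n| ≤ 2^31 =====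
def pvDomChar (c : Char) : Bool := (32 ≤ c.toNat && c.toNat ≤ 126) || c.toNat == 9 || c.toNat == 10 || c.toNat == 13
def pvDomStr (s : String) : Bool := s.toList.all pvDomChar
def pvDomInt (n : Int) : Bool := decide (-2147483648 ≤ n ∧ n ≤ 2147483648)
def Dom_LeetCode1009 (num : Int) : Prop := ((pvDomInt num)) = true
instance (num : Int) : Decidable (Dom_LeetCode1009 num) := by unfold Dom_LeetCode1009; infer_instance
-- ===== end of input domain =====

-- B replaces A's build-binary-string / flip-digits / re-weight pipeline by the closed form
-- (1 << num.bit_length()) - 1 - num; equivalence is claimed for 0 ≤ num (A's while-loop never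
-- terminates on negative input).

-- ===== PORT A =====
-- 'while num!=0' of GetBinary, with fuel; num.natAbs+1 steps suffice for every terminating run
def pvGetBinaryLoop (fuel : Nat) (num : Int) (lst : List String) : List String :=
  match fuel with
  | 0 => lst
  | f + 1 =>
    if num ≠ 0 then
      pvGetBinaryLoop f (PySem.Int.floordiv num 2) (lst ++ [PySem.Int.toStr (PySem.Int.mod num 2)])
    else lst

def pvGetBinary (num : Int) : String :=
  PySem.Str.join "" (pvGetBinaryLoop (num.natAbs + 1) num []).reverse

def pvGetComplement (bin_num : String) : List Int :=
  (PySem.List.pyRange 0 (PySem.Str.len bin_num) 1).foldl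
    (fun lst i => lst ++ [if PySem.Str.pyGet? bin_num i = some '0' then (1 : Int) else 0]) []

def LeetCode1009 (num : Int) : Int :=
  let bin_num := pvGetBinary num
  let com_num := pvGetComplement bin_num
  ((PySem.List.pyRange ((com_num.length : Int) - 1) (-1) (-1)).foldl
      (fun (sk : Int × Int) i => (sk.1 + PySem.List.pyGetD com_num i 0 * 2 ^ sk.2.toNat, sk.2 + 1))
      (0, 0)).1

-- ===== PORT B =====
def LeetCode1009_alt (num : Int) : Int :=
  (1 <<< PySem.Int.bitLength num) - 1 - num

-- ===== PRECONDITION & SPEC =====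
-- A's first while-loop diverges for num < 0 (num//2 stalls at -1), so negatives are excluded.
def Pre_LeetCode1009 (num : Int) : Prop := 0 ≤ num
instance (num : Int) : Decidable (Pre_LeetCode1009 num) := by unfold Pre_LeetCode1009; infer_instance
def pvWitness_LeetCode1009 : Int := (5)

def Spec_LeetCode1009 (num : Int) (out : Int) : Prop := out = LeetCode1009_alt num
instance (num : Int) (out : Int) : Decidable (Spec_LeetCode1009 num out) := by unfold Spec_LeetCode1009; infer_instance

-- ===== CLAIM (what is proved, stated in full; the proofs are below) =====
def Claim_equal_LeetCode1009 : Prop := ∀ (num : Int), Dom_LeetCode1009 num → Pre_LeetCode1009 num → Spec_LeetCode1009 num (LeetCode1009 num)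

-- ===== LEMMAS AND PROOFS =====

-- low-order-first binary digits of n, as characters
def pvCharDigits (n : Nat) : List Char :=
  if n = 0 then [] else (if n % 2 = 1 then '1' else '0') :: pvCharDigits (n / 2)
decreasing_by exact Nat.div_lt_self (Nat.pos_of_ne_zero (by assumption)) (by omega)

-- big-endian value of a digit list
def pvBigVal : List Int → Int
  | [] => 0
  | d :: r => d * 2 ^ r.length + pvBigVal r

-- low-order-first value of a digit list
def pvVal : List Int → Int
  | [] => 0
  | d :: r => d + 2 * pvVal r

theorem pvGetBinaryLoop_eq (fuel : Nat) : ∀ (n : Nat) (lst : List String), n < fuel →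
    pvGetBinaryLoop fuel (n : Int) lst = lst ++ (pvCharDigits n).map (fun c => String.ofList [c]) := by
  induction fuel with
  | zero => intro n lst h; omega
  | succ f ih =>
    intro n lst h
    by_cases hn : n = 0
    · subst hn; simp [pvGetBinaryLoop, pvCharDigits]
    · rw [pvGetBinaryLoop]
      rw [if_pos (by exact_mod_cast hn)]
      rw [show PySem.Int.floordiv (n : Int) 2 = ((n / 2 : Nat) : Int) from PySem.Int.floordiv_natCast n 2]
      rw [ih (n / 2) _ (by omega)]
      conv_rhs => rw [pvCharDigits, if_neg hn]
      have hm : PySem.Int.mod (n : Int) 2 = ((n % 2 : Nat) : Int) := PySem.Int.mod_natCast n 2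
      have hd : PySem.Int.toStr (PySem.Int.mod (n : Int) 2)
          = String.ofList [if n % 2 = 1 then '1' else '0'] := by
        rcases Nat.mod_two_eq_zero_or_one n with h2 | h2 <;> rw [hm, h2] <;> decide
      rw [hd]
      simp [List.append_assoc]

theorem pvGetBinary_toList (n : Nat) :
    (pvGetBinary (n : Int)).toList = (pvCharDigits n).reverse := by
  rw [pvGetBinary, pvGetBinaryLoop_eq _ n [] (by simp)]
  rw [PySem.Str.toList_join]
  simp [← List.map_reverse, List.map_map, Function.comp_def, String.toList_ofList,
    PySem.Chars.join_nil_singletons]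

theorem pvGetComplement_eq (s : String) :
    pvGetComplement s = s.toList.map (fun c => if c = '0' then (1 : Int) else 0) := by
  rw [pvGetComplement, PySem.List.foldl_append_singleton_eq_map]
  simp only [PySem.Str.len_eq, List.nil_append]
  rw [PySem.List.pyRange_zero_natCast]
  rw [List.map_map]
  apply List.ext_getElem (by simp)
  intro k h1 h2
  simp only [List.getElem_map, Function.comp_apply, List.getElem_range]
  rw [PySem.Str.pyGet?_natCast, List.getElem?_eq_getElem (by simpa using h1)]
  simp

theorem pvFoldr_bigVal (com : List Int) :
    com.foldr (fun d (sk : Int × Int) => (sk.1 + d * 2 ^ sk.2.toNat, sk.2 + 1)) ((0 : Int), (0 : Int))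
      = (pvBigVal com, (com.length : Int)) := by
  induction com with
  | nil => simp [pvBigVal]
  | cons d r ih =>
    simp [pvBigVal, ih]
    ring

theorem pvSumLoop_eq (com : List Int) :
    ((PySem.List.pyRange ((com.length : Int) - 1) (-1) (-1)).foldl
      (fun (sk : Int × Int) i => (sk.1 + PySem.List.pyGetD com i 0 * 2 ^ sk.2.toNat, sk.2 + 1))
      (0, 0)).1 = pvBigVal com := by
  rw [show ((com.length : Int) - 1) = ((-1 : Int) + 1 - 1 + com.length) by push_cast; ring] at *
  rw [show PySem.List.pyRange ((-1 : Int) + 1 - 1 + com.length) (-1) (-1)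
        = (PySem.List.pyRange 0 (com.length : Int) 1).reverse by
    rw [PySem.List.pyRange_neg_one_eq_reverse]; norm_num]
  rw [List.foldl_reverse]
  have h := PySem.List.map_pyGetD_pyRange_zero' com (0 : Int)
  rw [show (PySem.List.pyRange 0 (com.length : Int) 1).foldr
        (fun i (sk : Int × Int) => (sk.1 + PySem.List.pyGetD com i 0 * 2 ^ sk.2.toNat, sk.2 + 1)) (0, 0)
      = ((PySem.List.pyRange 0 (com.length : Int) 1).map (fun i => PySem.List.pyGetD com i 0)).foldr
        (fun d (sk : Int × Int) => (sk.1 + d * 2 ^ sk.2.toNat, sk.2 + 1)) (0, 0) by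
    rw [List.foldr_map]]
  rw [h, pvFoldr_bigVal]

theorem pvBigVal_append_singleton (xs : List Int) (d : Int) :
    pvBigVal (xs ++ [d]) = 2 * pvBigVal xs + d := by
  induction xs with
  | nil => simp [pvBigVal]
  | cons e r ih => simp [pvBigVal, ih]; ring

theorem pvBigVal_reverse (l : List Int) : pvBigVal l.reverse = pvVal l := by
  induction l with
  | nil => rfl
  | cons d r ih => simp [pvVal, pvBigVal_append_singleton, ih]; ring

theorem pvCharDigits_length (n : Nat) :
    (pvCharDigits n).length = PySem.Int.bitLength (n : Int) := by
  induction n using Nat.strong_induction_on with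
  | _ n ih =>
    by_cases hn : n = 0
    · subst hn; simp [pvCharDigits, PySem.Int.bitLength_zero]
    · rw [pvCharDigits, if_neg hn]
      rw [PySem.Int.bitLength_natCast (Nat.pos_of_ne_zero hn)]
      simp [ih (n / 2) (Nat.div_lt_self (Nat.pos_of_ne_zero hn) (by omega))]

theorem pvVal_flip (n : Nat) :
    pvVal ((pvCharDigits n).map (fun c => if c = '0' then (1 : Int) else 0))
      = 2 ^ (pvCharDigits n).length - 1 - n := by
  induction n using Nat.strong_induction_on with
  | _ n ih =>
    by_cases hn : n = 0
    · subst hn; simp [pvCharDigits, pvVal]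
    · rw [pvCharDigits, if_neg hn]
      have hrec := ih (n / 2) (Nat.div_lt_self (Nat.pos_of_ne_zero hn) (by omega))
      have hmod := Nat.mod_two_eq_zero_or_one n
      have hdiv : n = 2 * (n / 2) + n % 2 := by omega
      rcases hmod with h2 | h2 <;>
        · simp [pvVal, h2, hrec, pow_succ]
          omega

-- ===== VERDICT (by name: the statement is the Claim_ definition above) =====
theorem LeetCode1009_spec : Claim_equal_LeetCode1009 := by
  intro num _ hpre
  obtain ⟨n, rfl⟩ := Int.eq_ofNat_of_zero_le hpre
  show LeetCode1009 (n : Int) = LeetCode1009_alt (n : Int)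
  rw [LeetCode1009, LeetCode1009_alt]
  have hcom : pvGetComplement (pvGetBinary (n : Int))
      = ((pvCharDigits n).map (fun c => if c = '0' then (1 : Int) else 0)).reverse := by
    rw [pvGetComplement_eq, pvGetBinary_toList, List.map_reverse]
  rw [hcom, pvSumLoop_eq, pvBigVal_reverse, pvVal_flip, pvCharDigits_length]
  simp [Nat.shiftLeft_eq]
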